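-- pv_equiv track=rewrite | github.com/aiera-inc/aiera-mcp | aiera_mcp/tools/search/tools.py | _get_company_context_variations
-- ===== SOURCE A (Python) =====
-- def _get_company_context_variations(company_name: str) -> list[str]:
--     """Get company variations from known context mappings."""
--     # Known company mappings from the context tool
--     known_mappings = {
--         "Amazon": [
--             "AMZN",
--             "Amazon.com Inc",
--             "Amazon Inc",
--             "Amazon.com, Inc",
--             "amazon",
--         ],
--         "Microsoft": [
--             "MSFT",
--             "Microsoft Corp",
--             "Microsoft Corporation",
--             "microsoft corp",
--         ],
--         "Apple": ["AAPL", "Apple Inc"],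
--         "Google": [
--             "Alphabet Inc",
--             "GOOGL",
--             "GOOG",
--             "Google Inc",
--             "Alphabet",
--         ],
--         "Tesla": ["TSLA", "Tesla Inc", "Tesla Motors"],
--         "Meta": ["META", "Meta Platforms Inc", "Facebook Inc", "Facebook"],
--         "Netflix": ["NFLX", "Netflix Inc"],
--         "Nvidia": ["NVDA", "NVIDIA Corp", "NVIDIA Corporation"],
--     }
--
--     # Check for exact matches first
--     for key, variations in known_mappings.items():
--         if company_name.lower() in [key.lower()] + [v.lower() for v in variations]:
--             return [key] + variations
--
--     # Return basic variations if no known mapping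
--     return [
--         company_name,
--         company_name.lower(),
--         company_name.upper(),
--         company_name.title(),
--     ]
-- ===== SOURCE B (Python) =====
-- # Sorted flat alias table + hand-written binary search (bisect_left) instead of a linear
-- # scan over groups; correct because no alias is shared across groups.
-- _KNOWN_MAPPINGS = {
--     "Amazon": [
--         "AMZN",
--         "Amazon.com Inc",
--         "Amazon Inc",
--         "Amazon.com, Inc",
--         "amazon",
--     ],
--     "Microsoft": [
--         "MSFT",
--         "Microsoft Corp",
--         "Microsoft Corporation",
--         "microsoft corp",
--     ],
--     "Apple": ["AAPL", "Apple Inc"],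
--     "Google": [
--         "Alphabet Inc",
--         "GOOGL",
--         "GOOG",
--         "Google Inc",
--         "Alphabet",
--     ],
--     "Tesla": ["TSLA", "Tesla Inc", "Tesla Motors"],
--     "Meta": ["META", "Meta Platforms Inc", "Facebook Inc", "Facebook"],
--     "Netflix": ["NFLX", "Netflix Inc"],
--     "Nvidia": ["NVDA", "NVIDIA Corp", "NVIDIA Corporation"],
-- }
--
-- # Flatten once: every lowercased alias of a group, paired with the group's result list,
-- # sorted by alias so membership can be resolved by binary search.
-- _PAIRS = sorted(
--     ((alias.lower(), [key] + variations)
--      for key, variations in _KNOWN_MAPPINGS.items()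
--      for alias in [key] + variations),
--     key=lambda p: p[0],
-- )
-- _KEYS = [p[0] for p in _PAIRS]
-- _VALS = [p[1] for p in _PAIRS]
--
--
-- def _get_company_context_variations(company_name: str) -> list[str]:
--     """Get company variations from known context mappings."""
--     target = company_name.lower()
--     lo, hi = 0, len(_KEYS)
--     while lo < hi:  # bisect_left by hand (no imports in this module)
--         mid = (lo + hi) // 2
--         if _KEYS[mid] < target:
--             lo = mid + 1
--         else:
--             hi = mid
--     if lo < len(_KEYS) and _KEYS[lo] == target:
--         return _VALS[lo]
--     return [
--         company_name,
--         company_name.lower(),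
--         company_name.upper(),
--         company_name.title(),
--     ]
-- ===== Notes on version B (the rewrite author's own statement) =====
-- stated objective: alternative
-- what changed: Replaces A's per-call linear scan over the mapping groups (rebuilding and re-lowercasing each group's alias list on every call) by a flat (lowercased alias, result-list) table flattened and sorted once at module scope, resolved per call with a hand-written bisect_left binary search; correct because no alias is shared across groups.
import Mathlib
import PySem

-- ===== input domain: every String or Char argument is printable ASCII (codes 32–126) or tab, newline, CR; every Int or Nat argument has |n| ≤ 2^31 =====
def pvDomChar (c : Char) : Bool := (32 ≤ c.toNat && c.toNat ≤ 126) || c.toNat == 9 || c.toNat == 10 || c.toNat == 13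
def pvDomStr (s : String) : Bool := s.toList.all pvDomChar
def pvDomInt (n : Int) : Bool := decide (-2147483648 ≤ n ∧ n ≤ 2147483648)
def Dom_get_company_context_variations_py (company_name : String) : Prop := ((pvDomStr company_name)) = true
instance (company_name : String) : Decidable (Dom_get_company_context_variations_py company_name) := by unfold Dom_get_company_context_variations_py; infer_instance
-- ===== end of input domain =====

-- B replaces A's per-call linear scan over the mapping groups by a flat (lowercased alias, result) table
-- sorted once at module scope and a hand-written binary search (alternative; return value only).

-- Shared data: the known_mappings table (a dict literal in both Pythons → association list).
def knownMappings : List (String × List String) :=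
  [ ("Amazon", ["AMZN", "Amazon.com Inc", "Amazon Inc", "Amazon.com, Inc", "amazon"]),
    ("Microsoft", ["MSFT", "Microsoft Corp", "Microsoft Corporation", "microsoft corp"]),
    ("Apple", ["AAPL", "Apple Inc"]),
    ("Google", ["Alphabet Inc", "GOOGL", "GOOG", "Google Inc", "Alphabet"]),
    ("Tesla", ["TSLA", "Tesla Inc", "Tesla Motors"]),
    ("Meta", ["META", "Meta Platforms Inc", "Facebook Inc", "Facebook"]),
    ("Netflix", ["NFLX", "Netflix Inc"]),
    ("Nvidia", ["NVDA", "NVIDIA Corp", "NVIDIA Corporation"]) ]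

-- str.title() (no PySem primitive): uppercase a letter not preceded by a letter, lowercase the rest.
-- Exact on the ASCII domain (Python's boundary is 'previous char is cased'; on ASCII cased = alpha).
def titleChars : Bool → List Char → List Char
  | _, [] => []
  | prevAlpha, c :: rest =>
    if PySem.Chars.isalpha c then
      (if prevAlpha then PySem.Chars.lowerChar c else PySem.Chars.upperChar c)
        :: titleChars true rest
    else c :: titleChars false rest

def pyTitle (s : String) : String := String.ofList (titleChars false s.toList)

-- ===== PORT A =====
-- A's for-loop over known_mappings.items(); the condition's company_name.lower() is passed in once (same value each iteration).
def aFindLoop (cl : String) : List (String × List String) → Option (List String)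
  | [] => none
  | (key, variations) :: rest =>
    if cl ∈ [PySem.Str.lower key] ++ variations.map PySem.Str.lower then
      some (key :: variations)
    else aFindLoop cl rest

def get_company_context_variations_py (company_name : String) : List String :=
  match aFindLoop (PySem.Str.lower company_name) knownMappings with
  | some r => r
  | none =>
      [company_name, PySem.Str.lower company_name, PySem.Str.upper company_name,
       pyTitle company_name]

-- ===== PORT B =====
-- Module-scope: flatten the table into (alias.lower(), [key] + variations) pairs, sorted by alias.
def bPairs : List (String × List String) :=
  PySem.List.sorted
    (knownMappings.flatMap (fun kv => (kv.1 :: kv.2).map (fun al => (PySem.Str.lower al, kv.1 :: kv.2))))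
    (fun p => p.1) false

def bKeys : List String := bPairs.map (fun p => p.1)
def bVals : List (List String) := bPairs.map (fun p => p.2)

-- Source B's hand-written bisect_left while-loop (lo, hi mutable → recursion on hi - lo).
-- Indexing _KEYS[mid]: mid is always in range when lo < hi ≤ len, so getD is exact here.
def bslLoop (target : String) (lo hi : Nat) : Nat :=
  if lo < hi then
    if bKeys.getD ((lo + hi) / 2) "" < target then bslLoop target ((lo + hi) / 2 + 1) hi
    else bslLoop target lo ((lo + hi) / 2)
  else lo
termination_by hi - lo
decreasing_by all_goals omega

def get_company_context_variations_py_alt (company_name : String) : List String :=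
  let target := PySem.Str.lower company_name
  let lo := bslLoop target 0 bKeys.length
  if lo < bKeys.length ∧ bKeys.getD lo "" = target then bVals.getD lo []
  else
    [company_name, PySem.Str.lower company_name, PySem.Str.upper company_name,
     pyTitle company_name]

-- ===== PRECONDITION & SPEC =====
def Spec_get_company_context_variations_py (company_name : String) (out : List String) : Prop := out = get_company_context_variations_py_alt company_name
instance (company_name : String) (out : List String) : Decidable (Spec_get_company_context_variations_py company_name out) := by unfold Spec_get_company_context_variations_py; infer_instance

-- ===== CLAIM (what is proved, stated in full; the proofs are below) =====
def Claim_equal_get_company_context_variations_py : Prop := ∀ (company_name : String), Dom_get_company_context_variations_py company_name → Spec_get_company_context_variations_py company_name (get_company_context_variations_py company_name)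

-- ===== LEMMAS AND PROOFS =====

-- the lowercased aliases of one group, of a list of groups, and the flat (alias, result) pairs
def grpAliases (kv : String × List String) : List String :=
  (kv.1 :: kv.2).map PySem.Str.lower

def allAliases (gs : List (String × List String)) : List String :=
  gs.flatMap grpAliases

def pairsOf (gs : List (String × List String)) : List (String × List String) :=
  gs.flatMap (fun kv => (kv.1 :: kv.2).map (fun al => (PySem.Str.lower al, kv.1 :: kv.2)))

-- alias sets of distinct groups never overlap
def GroupsDisjoint (gs : List (String × List String)) : Prop :=
  List.Pairwise (fun kv1 kv2 => ∀ a ∈ grpAliases kv1, a ∉ grpAliases kv2) gs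

theorem knownMappings_disjoint : GroupsDisjoint knownMappings := by
  unfold GroupsDisjoint; decide

theorem map_fst_pairsOf (gs : List (String × List String)) :
    (pairsOf gs).map Prod.fst = allAliases gs := by
  induction gs with
  | nil => rfl
  | cons kv rest ih =>
      simp only [pairsOf, allAliases, List.flatMap_cons, List.map_append, List.map_map] at *
      rw [ih]
      rfl

-- A's loop returns none when s is not an alias at all
theorem aFindLoop_eq_none (s : String) :
    ∀ (gs : List (String × List String)), s ∉ allAliases gs → aFindLoop s gs = none := by
  intro gs
  induction gs with
  | nil => intro _; rfl
  | cons kv rest ih =>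
      intro h
      simp only [allAliases, List.flatMap_cons, List.mem_append] at h
      push Not at h
      obtain ⟨h1, h2⟩ := h
      cases kv with
      | mk k vs =>
          have hcond : s ∉ [PySem.Str.lower k] ++ vs.map PySem.Str.lower := by
            intro hc; exact h1 (by simpa [grpAliases] using hc)
          simp only [aFindLoop]
          rw [if_neg hcond]
          exact ih h2

-- A's first-match scan is determined by pair membership (groups being disjoint)
theorem aFindLoop_eq_some_of_pair (s : String) (v : List String) :
    ∀ (gs : List (String × List String)), GroupsDisjoint gs →
      (s, v) ∈ pairsOf gs → aFindLoop s gs = some v := by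
  intro gs
  induction gs with
  | nil => intro _ h; simp [pairsOf] at h
  | cons kv rest ih =>
      intro hd hmem
      rw [GroupsDisjoint, List.pairwise_cons] at hd
      obtain ⟨hdisj, hrest⟩ := hd
      simp only [pairsOf, List.flatMap_cons, List.mem_append, List.mem_map] at hmem
      cases kv with
      | mk k vs =>
          rcases hmem with ⟨al, hal, heq⟩ | hrestmem
          · have h1 : PySem.Str.lower al = s := congrArg Prod.fst heq
            have h2 : (k :: vs) = v := congrArg Prod.snd heq
            have hcond : s ∈ [PySem.Str.lower k] ++ vs.map PySem.Str.lower := by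
              have : s ∈ grpAliases (k, vs) := by
                simp only [grpAliases]
                exact h1 ▸ List.mem_map_of_mem hal
              simpa [grpAliases] using this
            simp only [aFindLoop]
            rw [if_pos hcond, h2]
          · have hsrest : s ∈ allAliases rest := by
              have : (s, v) ∈ pairsOf rest := by
                simpa [pairsOf] using hrestmem
              have := List.mem_map_of_mem (f := Prod.fst) this
              rwa [map_fst_pairsOf] at this
            have hnot : s ∉ grpAliases (k, vs) := by
              intro hin
              simp only [allAliases, List.mem_flatMap] at hsrest
              obtain ⟨kv', hkv', hs'⟩ := hsrest
              exact hdisj kv' hkv' s hin hs'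
            have hcond : s ∉ [PySem.Str.lower k] ++ vs.map PySem.Str.lower := by
              intro hc; exact hnot (by simpa [grpAliases] using hc)
            simp only [aFindLoop]
            rw [if_neg hcond]
            exact ih hrest (by simpa [pairsOf] using hrestmem)

-- bKeys is nondecreasing (the sort's postcondition)
theorem bKeys_sorted : List.Pairwise (· ≤ ·) bKeys :=
  PySem.List.sorted_map_key_pairwise ..

theorem bKeys_mono {i j : Nat} (hij : i ≤ j) (hj : j < bKeys.length) :
    bKeys.getD i "" ≤ bKeys.getD j "" := by
  rcases Nat.eq_or_lt_of_le hij with rfl | hlt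
  · exact le_refl _
  · have hi : i < bKeys.length := Nat.lt_trans hlt hj
    rw [List.getD_eq_getElem _ _ hi, List.getD_eq_getElem _ _ hj]
    exact (List.pairwise_iff_getElem.mp bKeys_sorted) i j hi hj hlt

-- binary-search invariant: everything left of the result is < target, nothing from the result on is
theorem bslLoop_spec (target : String) :
    ∀ (n lo hi : Nat), hi - lo = n → lo ≤ hi → hi ≤ bKeys.length →
      (∀ i, i < lo → bKeys.getD i "" < target) →
      (∀ i, hi ≤ i → i < bKeys.length → ¬ bKeys.getD i "" < target) →
      bslLoop target lo hi ≤ bKeys.length ∧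
      (∀ i, i < bslLoop target lo hi → bKeys.getD i "" < target) ∧
      (∀ i, bslLoop target lo hi ≤ i → i < bKeys.length → ¬ bKeys.getD i "" < target) := by
  intro n
  induction n using Nat.strong_induction_on with
  | _ n IH =>
      intro lo hi hn hlh hhi hlo hhiP
      rw [bslLoop]
      by_cases h : lo < hi
      · rw [if_pos h]
        by_cases hm : bKeys.getD ((lo + hi) / 2) "" < target
        · rw [if_pos hm]
          refine IH (hi - ((lo + hi) / 2 + 1)) (by omega) _ hi rfl (by omega) hhi ?_ hhiP
          intro i hi'
          rcases Nat.lt_or_ge i lo with h1 | h1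
          · exact hlo i h1
          · have : bKeys.getD i "" ≤ bKeys.getD ((lo + hi) / 2) "" :=
              bKeys_mono (by omega) (by omega)
            exact lt_of_le_of_lt this hm
        · rw [if_neg hm]
          have hmid : (lo + hi) / 2 ≤ bKeys.length := Nat.le_trans (by omega) hhi
          refine IH ((lo + hi) / 2 - lo) (by omega) lo _ rfl (by omega) hmid hlo ?_
          intro i hi1 hi2
          have : bKeys.getD ((lo + hi) / 2) "" ≤ bKeys.getD i "" := bKeys_mono hi1 hi2
          intro hc
          exact hm (lt_of_le_of_lt this hc)
      · rw [if_neg h]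
        exact ⟨by omega, fun i hi' => hlo i (by omega), fun i h1 h2 => hhiP i (by omega) h2⟩

-- membership in bKeys is membership in the alias table
theorem mem_bKeys_iff (s : String) : s ∈ bKeys ↔ s ∈ allAliases knownMappings := by
  unfold bKeys bPairs
  rw [← map_fst_pairsOf]
  constructor
  · intro h
    rcases List.mem_map.mp h with ⟨p, hp, rfl⟩
    exact List.mem_map_of_mem ((PySem.List.mem_sorted _ _ _ _).mp hp)
  · intro h
    rcases List.mem_map.mp h with ⟨p, hp, rfl⟩
    exact List.mem_map_of_mem ((PySem.List.mem_sorted _ _ _ _).mpr hp)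

theorem bPairs_sub : ∀ p ∈ bPairs, p ∈ pairsOf knownMappings := by
  intro p hp
  exact (PySem.List.mem_sorted _ _ _ _).mp hp

-- ===== VERDICT (by name: the statement is the Claim_ definition above) =====
theorem get_company_context_variations_py_spec : Claim_equal_get_company_context_variations_py := by
  intro company_name _
  unfold Spec_get_company_context_variations_py
  unfold get_company_context_variations_py get_company_context_variations_py_alt
  set target := PySem.Str.lower company_name with htarget
  set r := bslLoop target 0 bKeys.length with hr
  obtain ⟨hrle, hleft, hright⟩ :=
    bslLoop_spec target bKeys.length 0 bKeys.length rfl (Nat.zero_le _) (le_refl _)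
      (by intro i hi; omega) (by intro i h1 h2; omega)
  by_cases hcond : r < bKeys.length ∧ bKeys.getD r "" = target
  · -- found: the pair at index r determines A's first-match answer
    rw [if_pos hcond]
    obtain ⟨hrlt, hkey⟩ := hcond
    have hrlen : r < bPairs.length := by
      simpa [bKeys, List.length_map] using hrlt
    have hpmem : bPairs[r] ∈ pairsOf knownMappings := bPairs_sub _ (List.getElem_mem hrlen)
    have hfst : (bPairs[r]).1 = target := by
      rw [← hkey, List.getD_eq_getElem _ _ hrlt]
      simp [bKeys]
    have hsnd : bVals.getD r [] = (bPairs[r]).2 := by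
      rw [List.getD_eq_getElem _ _ (by simpa [bVals, List.length_map] using hrlen)]
      simp [bVals]
    have hA : aFindLoop target knownMappings = some (bPairs[r]).2 := by
      apply aFindLoop_eq_some_of_pair target _ knownMappings knownMappings_disjoint
      rw [← hfst]
      simpa using hpmem
    rw [hA, hsnd]
  · -- not found: target is no alias, both return the generic variations
    rw [if_neg hcond]
    have hnot : target ∉ allAliases knownMappings := by
      intro hmem
      rw [← mem_bKeys_iff] at hmem
      obtain ⟨i, hilen, hieq⟩ := List.mem_iff_getElem.mp hmem
      have hi' : bKeys.getD i "" = target := by rw [List.getD_eq_getElem _ _ hilen, hieq]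
      rcases Nat.lt_or_ge i r with h1 | h1
      · exact absurd (hi' ▸ hleft i h1) (lt_irrefl target)
      · have hrlt : r < bKeys.length := Nat.lt_of_le_of_lt h1 hilen
        have hne : bKeys.getD r "" ≠ target := fun hc => hcond ⟨hrlt, hc⟩
        have h2 : target ≤ bKeys.getD r "" := le_of_not_gt (hright r (le_refl _) hrlt)
        have h3 : bKeys.getD r "" ≤ bKeys.getD i "" := bKeys_mono h1 hilen
        exact hne (le_antisymm (hi' ▸ h3) h2)
    rw [aFindLoop_eq_none target knownMappings hnot]
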